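-- pv_equiv track=rewrite | github.com/patpij2/Logia-Competition-All-Solutions | logia 17/2/kolittt.py | kolit
-- ===== SOURCE A (Python) =====
-- def kolit(slowo):
--     licznik = 0
--
--     while len(slowo) > 0:
--         napis = ''
--         i = 0
--         krok = 1
--         while i < len(slowo):
--             napis += slowo[i]
--             slowo = slowo[:i] + '0' + slowo[i+1:]
--             i += krok
--             krok += 1
--
--         slowo = slowo.replace('0','')
--         if napis.count(napis[0]) == len(napis):
--             licznik += 1
--
--     return licznik
-- ===== SOURCE B (Python) =====
-- def kolit(slowo):
--     licznik = 0
--     s = slowo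
--     while s:
--         n = len(s)
--         tri = []
--         j = 0
--         while j * (j + 1) // 2 < n:
--             tri.append(j * (j + 1) // 2)
--             j += 1
--         picked = [s[t] for t in tri]
--         if all(c == picked[0] for c in picked):
--             licznik += 1
--         parts = [s[tri[k] + 1:tri[k + 1]] for k in range(len(tri) - 1)]
--         parts.append(s[tri[-1] + 1:])
--         s = ''.join(parts)
--     return licznik
-- ===== Notes on version B (the rewrite author's own statement) =====
-- stated objective: faster
-- what changed: B computes the triangular pick positions j*(j+1)//2 directly and rebuilds the survivors in one pass as the slices between consecutive picks, instead of A's per-pick full-string rebuild with a '0' sentinel followed by replace('0',''); B keeps real '0' characters that A's replace accidentally deletes.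
-- intended difference: On strings with a '0' at a non-triangular index, A's replace('0','') silently deletes that real '0' from the surviving string (e.g. on 'aa0' A returns 1), while B keeps it for later rounds (B returns 2 on 'aa0'), which is the intended behaviour since the '0' marks are only A's internal sentinel. — e.g. on kolit("aa0"): A returns 1, B returns 2
import Mathlib
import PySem

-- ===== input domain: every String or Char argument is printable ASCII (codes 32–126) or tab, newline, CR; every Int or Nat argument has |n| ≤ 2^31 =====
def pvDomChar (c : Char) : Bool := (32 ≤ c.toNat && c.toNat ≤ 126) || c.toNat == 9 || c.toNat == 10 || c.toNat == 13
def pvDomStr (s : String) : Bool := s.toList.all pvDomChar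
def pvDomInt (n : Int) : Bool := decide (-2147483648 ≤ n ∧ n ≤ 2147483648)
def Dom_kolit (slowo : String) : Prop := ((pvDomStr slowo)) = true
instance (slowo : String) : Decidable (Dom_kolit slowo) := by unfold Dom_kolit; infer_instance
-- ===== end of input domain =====

-- B computes the triangular pick positions directly and rebuilds the survivors as the slices
-- between consecutive picks (one pass, no per-pick string rebuild, no '0' sentinel); on strings
-- with a real '0' at a non-picked position A's replace('0','') deletes it while B keeps it (D_).

-- ===== PORT A =====
-- inner while-loop of A; `k` encodes Python's `krok` as `krok = k + 1` (so the jump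
-- `i += krok` is `i + (k+1)`, which lets Lean see the index strictly increase).
theorem kolitInner_dec (s : List Char) (i k : Nat) (h : i < s.length) :
    (s.take i ++ '0' :: s.drop (i + 1)).length - (i + (k + 1)) < s.length - i := by
  simp only [List.length_append, List.length_take, List.length_cons, List.length_drop]
  omega

def kolitInner (s : List Char) (i : Nat) (k : Nat) (napis : List Char) : List Char × List Char :=
  if _h : i < s.length then
    kolitInner (s.take i ++ '0' :: s.drop (i + 1)) (i + (k + 1)) (k + 1) (napis ++ [s.getD i ' '])
  else
    (napis, s)
termination_by s.length - i
decreasing_by exact kolitInner_dec s i k _h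

-- port-support lemmas cited by kolitLoop's decreasing_by
theorem kolitInner_len (s : List Char) (i k : Nat) (napis : List Char) :
    ((kolitInner s i k napis).2).length = s.length := by
  fun_induction kolitInner s i k napis with
  | case1 s i k napis h ih =>
      rw [ih]
      simp only [List.length_append, List.length_take, List.length_cons, List.length_drop]
      omega
  | case2 s i k napis h => rfl

theorem kolitInner_head (s : List Char) (i k : Nat) (napis : List Char) (hi : 1 ≤ i) :
    ((kolitInner s i k napis).2).head? = s.head? := by
  fun_induction kolitInner s i k napis with
  | case1 s i k napis h ih =>
      rw [ih (by omega)]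
      cases s with
      | nil => simp at h
      | cons a t =>
          obtain ⟨j, rfl⟩ : ∃ j, i = j + 1 := ⟨i - 1, by omega⟩
          simp [List.take_succ_cons]
  | case2 s i k napis h => rfl

theorem filter_head_zero (t : List Char) (ht : t.head? = some '0') :
    (t.filter (· != '0')).length < t.length := by
  cases t with
  | nil => simp at ht
  | cons a u =>
      simp only [List.head?_cons, Option.some.injEq] at ht
      subst ht
      simp only [List.filter_cons]
      norm_num
      have := List.length_filter_le (· != '0') u
      omega

theorem kolit_dec (s : List Char) (hs : s ≠ []) :
    (((kolitInner s 0 0 []).2).filter (· != '0')).length < s.length := by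
  have hh : ((kolitInner s 0 0 []).2).head? = some '0' := by
    cases s with
    | nil => exact absurd rfl hs
    | cons c cs =>
        rw [kolitInner, dif_pos (by simp : 0 < (c :: cs).length)]
        rw [kolitInner_head _ _ _ _ (by omega)]
        simp
  have hl := kolitInner_len s 0 0 []
  have := filter_head_zero _ hh
  omega

-- outer while-loop of A
def kolitLoop (s : List Char) (licznik : Int) : Int :=
  if hs : s = [] then licznik
  else
    let p := kolitInner s 0 0 []
    let s' := (p.2).filter (· != '0')          -- slowo.replace('0','')
    let licznik' := if (p.1).count ((p.1).getD 0 ' ') = (p.1).length then licznik + 1 else licznik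
    kolitLoop s' licznik'
termination_by s.length
decreasing_by exact kolit_dec s hs

def kolit (slowo : String) : Int := kolitLoop slowo.toList 0

-- ===== PORT B =====
-- j ≤ j*(j+1)/2, cited by triAux's decreasing_by
theorem tri_le (j : Nat) : j ≤ j * (j + 1) / 2 := by
  rcases Nat.eq_zero_or_pos j with rfl | hj
  · simp
  · have h2 : j * 2 ≤ j * (j + 1) := Nat.mul_le_mul (Nat.le_refl j) (by omega)
    omega

-- the `while j*(j+1)//2 < len(s)` loop of B
def triAux (n j : Nat) (acc : List Nat) : List Nat :=
  if j * (j + 1) / 2 < n then triAux n (j + 1) (acc ++ [j * (j + 1) / 2]) else acc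
termination_by n - j
decreasing_by have := tri_le j; omega

-- the survivors of one round of B: the slices of s between consecutive picks, then the tail
def kolitRestB (s : List Char) (tri : List Nat) : List Char :=
  (((List.range (tri.length - 1)).map (fun k =>
      PySem.List.slice s (some ((tri.getD k 0 : Int) + 1)) (some (tri.getD (k + 1) 0 : Int)))) ++
    [PySem.List.slice s (some ((tri.getLastD 0 : Int) + 1)) none]).flatten

-- outer while-loop of B; `fuel` is only a totality guard (each round shortens the string by
-- at least the one picked position 0, so `s.length + 1` rounds always reach the empty string)
def kolitLoopB (fuel : Nat) (s : List Char) (licznik : Int) : Int :=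
  match fuel with
  | 0 => licznik
  | fuel + 1 =>
    if s = [] then licznik
    else
      let tri := triAux s.length 0 []
      let picked := tri.map (fun t => s.getD t ' ')
      let licznik' := if picked.all (fun c => c == picked.getD 0 ' ') then licznik + 1 else licznik
      kolitLoopB fuel (kolitRestB s tri) licznik'

def kolit_alt (slowo : String) : Int := kolitLoopB (slowo.toList.length + 1) slowo.toList 0

-- ===== PRECONDITION & SPEC =====
-- i is a triangular number (some j*(j+1)/2)
def isTriB (i : Nat) : Bool := (List.range (i + 1)).any (fun j => j * j + j == 2 * i)

-- On strings with a '0' at a non-triangular index, A's replace('0','') deletes that real '0'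
-- from the survivors (e.g. A returns 1 on "aa0"), while B keeps it for later rounds (B returns
-- 2 on "aa0"); B's value is intended, the '0' marks being only A's internal sentinel.
def D_kolit (slowo : String) : Prop :=
  ((List.range slowo.toList.length).any
    (fun i => slowo.toList.getD i ' ' == '0' && !isTriB i)) = true
instance (slowo : String) : Decidable (D_kolit slowo) := by unfold D_kolit; infer_instance

def Spec_kolit (slowo : String) (out : Int) : Prop := ¬ D_kolit slowo → out = kolit_alt slowo
instance (slowo : String) (out : Int) : Decidable (Spec_kolit slowo out) := by
  unfold Spec_kolit; infer_instance

def pvDiffWitness_kolit : String := "aa0"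
def pvDiffWitnessOut_kolit : Int × Int := (1, 2)

-- ===== CLAIM (what is proved, stated in full; the proofs are below) =====
def Claim_unchanged_kolit : Prop := ∀ (slowo : String), Dom_kolit slowo → Spec_kolit slowo (kolit slowo)
def Claim_changed_kolit : Prop := Dom_kolit (pvDiffWitness_kolit) ∧ D_kolit (pvDiffWitness_kolit) ∧ kolit (pvDiffWitness_kolit) = pvDiffWitnessOut_kolit.1 ∧ kolit_alt (pvDiffWitness_kolit) = pvDiffWitnessOut_kolit.2 ∧ pvDiffWitnessOut_kolit.1 ≠ pvDiffWitnessOut_kolit.2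

-- ===== LEMMAS AND PROOFS =====

-- proof-side helper shared by both equivalence directions: the pick walk, `d` = distance to
-- the next picked position, `g` = current gap; .1 = picked chars, .2 = the other chars
def pick2 (cs : List Char) (d g : Nat) : List Char × List Char :=
  match cs, d with
  | [], _ => ([], [])
  | c :: cs', 0 => (c :: (pick2 cs' (g - 1) (g + 1)).1, (pick2 cs' (g - 1) (g + 1)).2)
  | c :: cs', d' + 1 => ((pick2 cs' d' g).1, c :: (pick2 cs' d' g).2)

theorem pick2_skip (cs : List Char) (d g : Nat) :
    pick2 cs d g = ((pick2 (cs.drop d) 0 g).1, cs.take d ++ (pick2 (cs.drop d) 0 g).2) := by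
  induction cs generalizing d with
  | nil => simp [pick2]
  | cons c cs' ih =>
      cases d with
      | zero => simp [pick2]
      | succ d' =>
          simp only [pick2, List.drop_succ_cons, List.take_succ_cons]
          rw [ih d']
          simp

theorem pick2_len (cs : List Char) (d g : Nat) :
    (pick2 cs d g).1.length + (pick2 cs d g).2.length = cs.length := by
  induction cs generalizing d g with
  | nil => simp [pick2]
  | cons c cs' ih =>
      cases d with
      | zero => simp only [pick2, List.length_cons]; rw [← ih (g - 1) (g + 1)]; omega
      | succ d' => simp only [pick2, List.length_cons]; rw [← ih d' g]; omega

theorem T_succ (j : Nat) : (j + 1) * (j + 2) / 2 = j * (j + 1) / 2 + (j + 1) := by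
  have e : (j + 1) * (j + 2) = j * (j + 1) + (j + 1) + (j + 1) := by ring
  omega

theorem triAux_acc (n : Nat) : ∀ m j acc, n - j ≤ m → triAux n j acc = acc ++ triAux n j [] := by
  intro m
  induction m with
  | zero =>
      intro j acc h
      have hng : ¬ j * (j + 1) / 2 < n := by have := tri_le j; omega
      rw [triAux, if_neg hng]
      conv_rhs => rw [triAux, if_neg hng]
      simp
  | succ m ih =>
      intro j acc h
      by_cases hj : j * (j + 1) / 2 < n
      · have hm : n - (j + 1) ≤ m := by have := tri_le j; omega
        rw [triAux, if_pos hj, ih (j + 1) _ hm]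
        conv_rhs => rw [triAux, if_pos hj, List.nil_append]
        rw [ih (j + 1) [j * (j + 1) / 2] hm]
        simp
      · rw [triAux, if_neg hj]
        conv_rhs => rw [triAux, if_neg hj]
        simp

theorem triAux_cons (n j : Nat) (h : j * (j + 1) / 2 < n) :
    triAux n j [] = j * (j + 1) / 2 :: triAux n (j + 1) [] := by
  rw [triAux, if_pos h, triAux_acc n (n - (j + 1)) (j + 1) _ le_rfl]
  simp

theorem triAux_nil (n j : Nat) (h : ¬ j * (j + 1) / 2 < n) : triAux n j [] = [] := by
  rw [triAux, if_neg h]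

theorem kolitRestB_single (s : List Char) (t : Nat) :
    kolitRestB s [t] = s.drop (t + 1) := by
  unfold kolitRestB
  have h1 : ([t] : List Nat).length - 1 = 0 := rfl
  rw [h1, List.range_zero]
  simp only [List.map_nil, List.nil_append, List.flatten_cons, List.flatten_nil,
    List.append_nil, List.getLastD_cons, List.getLastD_nil]
  rw [show ((t : Int) + 1) = ((t + 1 : Nat) : Int) by push_cast; ring,
    PySem.List.slice_from_natCast]

theorem kolitRestB_cons (s : List Char) (t0 t1 : Nat) (ts : List Nat) :
    kolitRestB s (t0 :: t1 :: ts) =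
      (s.drop (t0 + 1)).take (t1 - (t0 + 1)) ++ kolitRestB s (t1 :: ts) := by
  unfold kolitRestB
  have hlen : (t0 :: t1 :: ts).length - 1 = ((t1 :: ts).length - 1) + 1 := by simp
  rw [hlen, List.range_succ_eq_map]
  have hc : ((t0 : Int) + 1) = ((t0 + 1 : Nat) : Int) := by push_cast; ring
  simp only [List.map_cons, List.map_map, List.getD_cons_zero, List.getD_cons_succ,
    List.getLastD_cons]
  rw [List.cons_append, List.flatten_cons]
  congr 1
  rw [hc, PySem.List.slice_natCast]

-- one round of B equals the pick walk (cited, through roundB_pick2, by kolitLoopB's decreasing_by)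
theorem walk (s : List Char) : ∀ m j, s.length - j ≤ m → j * (j + 1) / 2 < s.length →
    ((triAux s.length j []).map (fun t => s.getD t ' ') =
        (pick2 (s.drop (j * (j + 1) / 2)) 0 (j + 1)).1 ∧
      kolitRestB s (triAux s.length j []) = (pick2 (s.drop (j * (j + 1) / 2)) 0 (j + 1)).2) := by
  intro m
  induction m with
  | zero =>
      intro j acc h
      have := tri_le j; omega
  | succ m ih =>
      intro j h hj
      have hu : s.drop (j * (j + 1) / 2) =
          s.getD (j * (j + 1) / 2) ' ' :: s.drop (j * (j + 1) / 2 + 1) := by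
        rw [List.drop_eq_getElem_cons hj]
        congr 1
        exact (List.getD_eq_getElem s ' ' hj).symm
      have hTs := T_succ j
      have hdrop : (s.drop (j * (j + 1) / 2 + 1)).drop j = s.drop ((j + 1) * (j + 2) / 2) := by
        rw [List.drop_drop]; congr 1; omega
      rw [triAux_cons _ _ hj, hu]
      simp only [List.map_cons, pick2, Nat.add_sub_cancel]
      rw [pick2_skip (s.drop (j * (j + 1) / 2 + 1)) j (j + 2), hdrop]
      by_cases h2 : (j + 1) * (j + 2) / 2 < s.length
      · obtain ⟨ihm, ihr⟩ := ih (j + 1) (by have := tri_le j; omega) h2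
        constructor
        · rw [ihm]
        · have hne : triAux s.length (j + 1) [] ≠ [] := by
            rw [triAux_cons _ _ h2]; simp
          obtain ⟨t1, ts, ht⟩ := List.exists_cons_of_ne_nil hne
          have ht1 : t1 = (j + 1) * (j + 2) / 2 := by
            rw [triAux_cons _ _ h2] at ht
            exact (List.cons_eq_cons.mp ht).1.symm
          rw [ht, kolitRestB_cons, ← ht, ihr]
          have htk : t1 - (j * (j + 1) / 2 + 1) = j := by omega
          rw [htk]
      · have hnil : triAux s.length (j + 1) [] = [] := triAux_nil _ _ h2
        rw [hnil]
        have hdnil : s.drop ((j + 1) * (j + 2) / 2) = [] :=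
          List.drop_eq_nil_of_le (by omega)
        rw [hdnil]
        simp only [pick2, List.map_nil, kolitRestB_single, List.append_nil]
        constructor
        · trivial
        · rw [List.take_of_length_le]
          simp only [List.length_drop]
          omega

theorem roundB_pick2 (s : List Char) (hs : s ≠ []) :
    (triAux s.length 0 []).map (fun t => s.getD t ' ') = (pick2 s 0 1).1 ∧
      kolitRestB s (triAux s.length 0 []) = (pick2 s 0 1).2 := by
  have h0 : 0 * (0 + 1) / 2 < s.length := by
    cases s with
    | nil => exact absurd rfl hs
    | cons a t => simp
  have := walk s s.length 0 (by omega) h0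
  simpa using this

-- A's inner loop characterised through the filtered pick walk (pickF = pick2 with the
-- '0'-filter folded into the second component)
def pickF (cs : List Char) (d : Nat) (g : Nat) : List Char × List Char :=
  match cs, d with
  | [], _ => ([], [])
  | c :: cs', 0 => ((c :: (pickF cs' (g - 1) (g + 1)).1), (pickF cs' (g - 1) (g + 1)).2)
  | c :: cs', d' + 1 =>
      ((pickF cs' d' g).1, if c = '0' then (pickF cs' d' g).2 else c :: (pickF cs' d' g).2)

theorem pickF_skip (cs : List Char) (d g : Nat) :
    pickF cs d g = ((pickF (cs.drop d) 0 g).1,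
      (cs.take d).filter (· != '0') ++ (pickF (cs.drop d) 0 g).2) := by
  induction cs generalizing d with
  | nil => simp [pickF]
  | cons c cs' ih =>
      cases d with
      | zero => simp [pickF]
      | succ d' =>
          simp only [pickF, List.drop_succ_cons, List.take_succ_cons, List.filter_cons]
          rw [ih d']
          by_cases hc : c = '0' <;> simp [hc]

theorem kolitInner_pickF (s : List Char) (i k : Nat) (napis : List Char) :
    (kolitInner s i k napis).1 = napis ++ (pickF (s.drop i) 0 (k + 1)).1 ∧
    ((kolitInner s i k napis).2).filter (· != '0') =
      (s.take i).filter (· != '0') ++ (pickF (s.drop i) 0 (k + 1)).2 := by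
  fun_induction kolitInner s i k napis with
  | case1 s i k napis h ih =>
      obtain ⟨ih1, ih2⟩ := ih
      have hsplit : s.take i ++ '0' :: s.drop (i + 1) = (s.take i ++ ['0']) ++ s.drop (i + 1) := by
        simp
      have hlen : (s.take i ++ ['0']).length = i + 1 := by
        simp [List.length_take]; omega
      have hidx : i + (k + 1) = (s.take i ++ ['0']).length + k := by omega
      have F4 : (s.take i ++ '0' :: s.drop (i + 1)).drop (i + (k + 1)) = (s.drop (i + 1)).drop k := by
        rw [hsplit, hidx, List.drop_append, List.drop_eq_nil_of_le (by omega),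
          Nat.add_sub_cancel_left]
        simp
      have F5 : (s.take i ++ '0' :: s.drop (i + 1)).take (i + (k + 1)) =
          (s.take i ++ ['0']) ++ (s.drop (i + 1)).take k := by
        rw [hsplit, hidx, List.take_append, List.take_of_length_le (by omega),
          Nat.add_sub_cancel_left]
      have F1 : s.drop i = s.getD i ' ' :: s.drop (i + 1) := by
        rw [List.drop_eq_getElem_cons h]
        congr 1
        exact (List.getD_eq_getElem s ' ' h).symm
      have Fsk := pickF_skip (s.drop (i + 1)) k (k + 2)
      constructor
      · rw [ih1, F4, F1]
        simp only [pickF, Nat.add_sub_cancel]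
        rw [Fsk]
        simp
      · rw [ih2, F4, F5, F1]
        simp only [pickF, Nat.add_sub_cancel]
        rw [Fsk]
        simp [List.filter_append]
  | case2 s i k napis h =>
      have : s.drop i = [] := List.drop_eq_nil_of_le (le_of_not_gt h)
      simp [this, pickF, List.take_of_length_le (le_of_not_gt h)]

theorem pickF_eq_pick2 (cs : List Char) (d g : Nat) :
    pickF cs d g = ((pick2 cs d g).1, (pick2 cs d g).2.filter (· != '0')) := by
  induction cs generalizing d g with
  | nil => simp [pickF, pick2]
  | cons c cs' ih =>
      cases d with
      | zero => simp only [pickF, pick2, ih]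
      | succ d' =>
          simp only [pickF, pick2, ih, List.filter_cons]
          by_cases hc : c = '0' <;> simp [hc]

theorem roundA_pick2 (s : List Char) :
    (kolitInner s 0 0 []).1 = (pick2 s 0 1).1 ∧
    ((kolitInner s 0 0 []).2).filter (· != '0') = (pick2 s 0 1).2.filter (· != '0') := by
  have h := kolitInner_pickF s 0 0 []
  simp only [List.drop_zero, List.take_zero, List.filter_nil, List.nil_append] at h
  rw [pickF_eq_pick2] at h
  exact h

-- membership in the walk's second component
theorem pick2_mem_snd (cs : List Char) (d g : Nat) (c : Char) (hc : c ∈ (pick2 cs d g).2) :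
    c ∈ cs := by
  induction cs generalizing d g with
  | nil => simp [pick2] at hc
  | cons a cs' ih =>
      cases d with
      | zero => simp only [pick2] at hc; exact List.mem_cons_of_mem a (ih _ _ hc)
      | succ d' =>
          simp only [pick2, List.mem_cons] at hc
          rcases hc with h | h
          · exact h ▸ List.mem_cons_self
          · exact List.mem_cons_of_mem a (ih _ _ h)

theorem tri_mono (j k : Nat) (h : j ≤ k) : j * (j + 1) / 2 ≤ k * (k + 1) / 2 := by
  have h2 : j * (j + 1) ≤ k * (k + 1) := Nat.mul_le_mul (by omega) (by omega)
  omega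

theorem notTri_between (g m : Nat) (hg : 1 ≤ g) (h1 : (g - 1) * g / 2 < m)
    (h2 : m < g * (g + 1) / 2) : isTriB m = false := by
  by_contra h
  rw [Bool.not_eq_false, isTriB, List.any_eq_true] at h
  obtain ⟨j, -, hj⟩ := h
  rw [beq_iff_eq] at hj
  have hjj : j * (j + 1) = j * j + j := by ring
  have hjm : j * (j + 1) / 2 = m := by omega
  by_cases hle : j ≤ g - 1
  · have hm := tri_mono j (g - 1) hle
    have hg1 : (g - 1) + 1 = g := by omega
    rw [hg1] at hm
    omega
  · have hm := tri_mono g j (by omega)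
    omega

-- every survivor of the walk sits at a non-triangular index
theorem pick2_mem_rest (cs : List Char) : ∀ (a d g : Nat), a + d = (g - 1) * g / 2 → 1 ≤ g →
    (∀ m, a ≤ m → m < a + d → isTriB m = false) →
    ∀ c ∈ (pick2 cs d g).2, ∃ i, i < cs.length ∧ cs.getD i ' ' = c ∧ isTriB (a + i) = false := by
  induction cs with
  | nil => intro a d g _ _ _ c hc; simp [pick2] at hc
  | cons x cs' ih =>
      intro a d g H1 H2 H3 c hc
      cases d with
      | zero =>
          simp only [pick2] at hc
          have hT : a = (g - 1) * g / 2 := by omega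
          have hTs : g * (g + 1) / 2 = (g - 1) * g / 2 + g := by
            have := T_succ (g - 1)
            have hg1 : g - 1 + 1 = g := by omega
            rw [hg1] at this
            have hg2 : g - 1 + 2 = g + 1 := by omega
            rw [hg2] at this
            omega
          obtain ⟨i, hi, hgd, hnt⟩ := ih (a + 1) (g - 1) (g + 1)
            (by simp only [Nat.add_sub_cancel]; omega) (by omega)
            (fun m hm1 hm2 => notTri_between g m H2 (by omega) (by omega)) c hc
          exact ⟨i + 1, by simp only [List.length_cons]; omega, by simpa using hgd, by
            have : a + 1 + i = a + (i + 1) := by omega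
            rw [← this]; exact hnt⟩
      | succ d' =>
          simp only [pick2, List.mem_cons] at hc
          rcases hc with rfl | hc
          · exact ⟨0, by simp, by simp, by
              have := H3 a (le_refl a) (by omega)
              simpa using this⟩
          · obtain ⟨i, hi, hgd, hnt⟩ := ih (a + 1) d' g (by omega) H2
              (fun m hm1 hm2 => H3 m (by omega) (by omega)) c hc
            exact ⟨i + 1, by simp only [List.length_cons]; omega, by simpa using hgd, by
              have : a + 1 + i = a + (i + 1) := by omega
              rw [← this]; exact hnt⟩

-- the two counting conditions agree on a common napis list
theorem cond_iff (l : List Char) :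
    (l.all (fun c => c == l.getD 0 ' ') = true) ↔ (l.count (l.getD 0 ' ') = l.length) := by
  rw [List.all_eq_true, List.count_eq_length]
  constructor
  · intro h b hb; exact ((beq_iff_eq).mp (h b hb)).symm
  · intro h b hb; exact (beq_iff_eq).mpr (h b hb).symm

-- outer loops agree on '0'-free strings (any sufficient fuel on B's side)
theorem loop_eq (f : Nat) : ∀ (s : List Char) (licznik : Int), '0' ∉ s → s.length < f →
    kolitLoop s licznik = kolitLoopB f s licznik := by
  induction f with
  | zero =>
      intro s licznik _ hn
      omega
  | succ m ih =>
      intro s licznik hz hn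
      rw [kolitLoop, kolitLoopB]
      by_cases hs : s = []
      · simp [hs]
      · simp only [dif_neg hs, if_neg hs]
        obtain ⟨hA1, hA2⟩ := roundA_pick2 s
        obtain ⟨hB1, hB2⟩ := roundB_pick2 s hs
        have hzf : (pick2 s 0 1).2.filter (· != '0') = (pick2 s 0 1).2 := by
          apply List.filter_eq_self.mpr
          intro c hc
          have : c ∈ s := pick2_mem_snd s 0 1 c hc
          simp only [bne_iff_ne, ne_eq]
          intro h; exact hz (h ▸ this)
        have hcond : ((pick2 s 0 1).1.count ((pick2 s 0 1).1.getD 0 ' ') =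
            (pick2 s 0 1).1.length) ↔
            ((pick2 s 0 1).1.all (fun c => c == (pick2 s 0 1).1.getD 0 ' ') = true) :=
          (cond_iff _).symm
        rw [hA1, hA2, hzf, hB1, hB2]
        have hlen : (pick2 s 0 1).2.length < m := by
          cases s with
          | nil => exact absurd rfl hs
          | cons c cs =>
              have h1 := pick2_len (c :: cs) 0 1
              have h2 : (pick2 (c :: cs) 0 1).1.length =
                  (pick2 cs (1 - 1) (1 + 1)).1.length + 1 := by
                rw [show (pick2 (c :: cs) 0 1).1 = c :: (pick2 cs (1 - 1) (1 + 1)).1 from rfl]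
                simp
              have h3 : (c :: cs).length = cs.length + 1 := by simp
              omega

        have hz' : '0' ∉ (pick2 s 0 1).2 := fun h => hz (pick2_mem_snd s 0 1 '0' h)
        rw [ih _ _ hz' hlen]
        congr 1
        split_ifs with h1 h2 h2
        · rfl
        · exact absurd (hcond.mp h1) h2
        · exact absurd (hcond.mpr h2) h1
        · rfl

-- single-round unfoldings used to evaluate the ports at the witness
theorem stepA (s : List Char) (hs : s ≠ []) (c : Int) :
    kolitLoop s c = kolitLoop ((pick2 s 0 1).2.filter (· != '0'))
      (if (pick2 s 0 1).1.count ((pick2 s 0 1).1.getD 0 ' ') = (pick2 s 0 1).1.length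
        then c + 1 else c) := by
  rw [kolitLoop]
  simp only [dif_neg hs]
  rw [(roundA_pick2 s).1, (roundA_pick2 s).2]

theorem stepB (f : Nat) (s : List Char) (hs : s ≠ []) (c : Int) :
    kolitLoopB (f + 1) s c = kolitLoopB f (pick2 s 0 1).2
      (if (pick2 s 0 1).1.all (fun x => x == (pick2 s 0 1).1.getD 0 ' ')
        then c + 1 else c) := by
  rw [kolitLoopB]
  simp only [if_neg hs]
  rw [(roundB_pick2 s hs).1, (roundB_pick2 s hs).2]

theorem main_eq (slowo : String) (hD : ¬ D_kolit slowo) : kolit slowo = kolit_alt slowo := by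
  unfold kolit kolit_alt
  set s := slowo.toList with hs_def
  by_cases hs : s = []
  · rw [kolitLoop, kolitLoopB]; simp [hs]
  · rw [kolitLoop, kolitLoopB]
    simp only [dif_neg hs, if_neg hs]
    obtain ⟨hA1, hA2⟩ := roundA_pick2 s
    obtain ⟨hB1, hB2⟩ := roundB_pick2 s hs
    unfold D_kolit at hD
    rw [← hs_def, Bool.not_eq_true, List.any_eq_false] at hD
    have hnz : ∀ c ∈ (pick2 s 0 1).2, c ≠ '0' := by
      intro c hc
      obtain ⟨i, hi, hgd, hnt⟩ := pick2_mem_rest s 0 0 1 (by norm_num) (Nat.le_refl 1)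
        (fun m h1 h2 => absurd h2 (by omega)) c hc
      intro hc0
      have hdi := hD i (List.mem_range.mpr hi)
      rw [Bool.not_eq_true, Bool.and_eq_false_iff] at hdi
      rcases hdi with h | h
      · rw [beq_eq_false_iff_ne] at h
        exact h (hgd.trans hc0)
      · simp only [Bool.not_eq_false'] at h
        simp only [Nat.zero_add] at hnt
        rw [hnt] at h
        exact Bool.false_ne_true h
    have hzf : (pick2 s 0 1).2.filter (· != '0') = (pick2 s 0 1).2 := by
      apply List.filter_eq_self.mpr
      intro c hc
      simpa using hnz c hc
    rw [hA1, hA2, hzf, hB1, hB2]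
    have hz' : '0' ∉ (pick2 s 0 1).2 := fun h => hnz '0' h rfl
    have hrl : (pick2 s 0 1).2.length < s.length := by
      obtain ⟨c, cs, hcc⟩ := List.exists_cons_of_ne_nil hs
      rw [hcc]
      have h1 := pick2_len (c :: cs) 0 1
      have h2 : (pick2 (c :: cs) 0 1).1.length =
          (pick2 cs (1 - 1) (1 + 1)).1.length + 1 := by
        rw [show (pick2 (c :: cs) 0 1).1 = c :: (pick2 cs (1 - 1) (1 + 1)).1 from rfl]
        simp
      have h3 : (c :: cs).length = cs.length + 1 := by simp
      omega
    rw [loop_eq s.length _ _ hz' hrl]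
    congr 1
    split_ifs with h1 h2 h2
    · rfl
    · exact absurd ((cond_iff _).mpr h1) h2
    · exact absurd ((cond_iff _).mp h2) h1
    · rfl

-- ===== VERDICT (by name: the statement is the Claim_ definition above) =====
theorem kolit_spec : Claim_unchanged_kolit := by
  intro slowo _ hD
  exact main_eq slowo hD

theorem kolit_changed : Claim_changed_kolit := by
  unfold Claim_changed_kolit
  refine ⟨by decide, by decide, ?_, ?_, by decide⟩
  · show kolitLoop ['a', 'a', '0'] 0 = 1
    rw [stepA _ (by decide)]
    norm_num [pick2]
    rw [kolitLoop]
    simp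
  · show kolitLoopB 4 ['a', 'a', '0'] 0 = 2
    rw [stepB 3 _ (by decide)]
    norm_num [pick2]
    rw [stepB 2 _ (by decide)]
    norm_num [pick2]
    rw [kolitLoopB]
    simp
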